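-- pv_equiv track=rewrite | github.com/webknjaz/battle2012 | src/jobinator/facts/factcreator.py | factsLinksProcessing
-- ===== SOURCE A (Python) =====
-- def factsLinksProcessing(factSet, backFacts):
--     changed = True
--     while changed:
--         changed = False
--         temporary = set()
--         for f in factSet:
--             if f in backFacts:
--                 temporary.update(backFacts[f])
--
--         previousLength = len(factSet)
--         factSet.update(temporary)
--         if previousLength != len(factSet):
--             changed = True
--
--     return factSet
-- ===== SOURCE B (Python) =====
-- def factsLinksProcessing(factSet, backFacts):
--     # BFS worklist: each round looks up backFacts only for the facts added in the
--     # previous round, instead of rescanning the whole (growing) factSet each round.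
--     queue = list(factSet)
--     while queue:
--         nxt = []
--         for f in queue:
--             for v in backFacts.get(f, ()):
--                 if v not in factSet:
--                     factSet.add(v)
--                     nxt.append(v)
--         queue = nxt
--     return factSet
-- ===== Notes on version B (the rewrite author's own statement) =====
-- stated objective: alternative
-- what changed: A rescans the entire (growing) factSet every round until a fixpoint; B keeps a worklist of only the facts added in the previous round, so every fact's backFacts entry is looked up once (BFS transitive closure).
import Mathlib
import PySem

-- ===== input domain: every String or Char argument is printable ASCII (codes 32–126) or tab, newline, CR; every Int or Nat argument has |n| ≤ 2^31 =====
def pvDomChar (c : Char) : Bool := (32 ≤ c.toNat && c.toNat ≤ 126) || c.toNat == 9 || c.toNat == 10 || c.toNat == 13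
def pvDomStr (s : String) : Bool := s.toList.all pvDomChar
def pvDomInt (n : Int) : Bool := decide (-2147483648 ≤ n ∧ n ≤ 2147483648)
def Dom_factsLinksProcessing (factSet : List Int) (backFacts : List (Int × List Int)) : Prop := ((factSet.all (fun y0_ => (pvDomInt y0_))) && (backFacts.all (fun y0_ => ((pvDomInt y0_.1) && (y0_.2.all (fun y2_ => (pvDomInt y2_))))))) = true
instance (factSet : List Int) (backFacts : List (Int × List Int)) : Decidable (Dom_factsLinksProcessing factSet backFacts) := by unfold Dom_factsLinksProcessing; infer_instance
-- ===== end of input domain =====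

-- B replaces A's repeated rescans of the whole growing factSet by a worklist that looks up each
-- fact's backFacts entry only once (BFS transitive closure); the equivalence proved here is about
-- the return value (the Python A and B both also mutate the factSet argument in place).

-- fuel for the ports' `while` loops (a port artifact): every element either loop ever adds comes
-- from a value list of backFacts, and each extra round consumes at least one such addition, so
-- (total number of values) + 1 rounds always suffice, for A's loop and for B's alike.
def pvFuel (backFacts : List (Int × List Int)) : Nat :=
  backFacts.foldl (fun a p => a + p.2.length) 0 + 1

-- ===== PORT A =====
-- temporary = set(); for f in factSet: if f in backFacts: temporary.update(backFacts[f])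
def pvRound (backFacts : List (Int × List Int)) (factSet : PySem.Set Int) : PySem.Set Int :=
  factSet.foldl (fun temporary f =>
    match (PySem.Dict.mk backFacts).get? f with
    | some vs => PySem.Set.update temporary vs
    | none => temporary) PySem.Set.empty

-- while changed: ... previousLength = len(factSet); factSet.update(temporary); changed = (lengths differ)
def pvALoop (backFacts : List (Int × List Int)) : Nat → PySem.Set Int → List Int
  | 0, factSet => factSet
  | fuel + 1, factSet =>
    let temporary := pvRound backFacts factSet
    let factSet' := PySem.Set.update factSet temporary
    if factSet'.length ≠ factSet.length then pvALoop backFacts fuel factSet' else factSet'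

def factsLinksProcessing (factSet : List Int) (backFacts : List (Int × List Int)) : List Int :=
  pvALoop backFacts (pvFuel backFacts) factSet

-- ===== PORT B =====
-- for v in backFacts.get(f, ()): if v not in factSet: factSet.add(v); nxt.append(v)
def pvStep (backFacts : List (Int × List Int)) (st : List Int × List Int) (f : Int) : List Int × List Int :=
  ((PySem.Dict.mk backFacts).getD f []).foldl
    (fun st v => if v ∈ st.1 then st else (st.1 ++ [v], st.2 ++ [v])) st

-- while queue: nxt = []; for f in queue: ...; queue = nxt
def pvBLoop (backFacts : List (Int × List Int)) : Nat → List Int → List Int → List Int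
  | _, factSet, [] => factSet
  | 0, factSet, _ => factSet
  | fuel + 1, factSet, queue =>
    let r := queue.foldl (pvStep backFacts) (factSet, [])
    pvBLoop backFacts fuel r.1 r.2

def factsLinksProcessing_alt (factSet : List Int) (backFacts : List (Int × List Int)) : List Int :=
  pvBLoop backFacts (pvFuel backFacts) factSet factSet

-- ===== PRECONDITION & SPEC =====
def Spec_factsLinksProcessing (factSet : List Int) (backFacts : List (Int × List Int)) (out : List Int) : Prop := out = factsLinksProcessing_alt factSet backFacts
instance (factSet : List Int) (backFacts : List (Int × List Int)) (out : List Int) : Decidable (Spec_factsLinksProcessing factSet backFacts out) := by unfold Spec_factsLinksProcessing; infer_instance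

-- ===== CLAIM (what is proved, stated in full; the proofs are below) =====
def Claim_equal_factsLinksProcessing : Prop := ∀ (factSet : List Int) (backFacts : List (Int × List Int)), Dom_factsLinksProcessing factSet backFacts → Spec_factsLinksProcessing factSet backFacts (factsLinksProcessing factSet backFacts)

-- ===== LEMMAS AND PROOFS =====

-- the successor list of one fact
def pvSucc (backFacts : List (Int × List Int)) (f : Int) : List Int :=
  (PySem.Dict.mk backFacts).getD f []

-- A's temporary-building fold, from any accumulator, is one Set.update with the
-- concatenated successor lists
theorem pvRound_aux (backFacts : List (Int × List Int)) (l : List Int) :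
    ∀ t : PySem.Set Int,
    l.foldl (fun temporary f =>
      match (PySem.Dict.mk backFacts).get? f with
      | some vs => PySem.Set.update temporary vs
      | none => temporary) t = PySem.Set.update t (l.flatMap (pvSucc backFacts)) := by
  induction l with
  | nil => intro t; simp [PySem.Set.update]
  | cons f l ih =>
    intro t
    simp only [List.foldl_cons, List.flatMap_cons, PySem.Set.update_append, ih]
    congr 1
    cases h : (PySem.Dict.mk backFacts).get? f with
    | none => simp [pvSucc, PySem.Dict.getD, h, PySem.Set.update]
    | some vs => simp [pvSucc, PySem.Dict.getD, h]

theorem pvRound_eq (backFacts : List (Int × List Int)) (factSet : PySem.Set Int) :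
    pvRound backFacts factSet = PySem.Set.ofList (factSet.flatMap (pvSucc backFacts)) := by
  rw [pvRound, pvRound_aux backFacts factSet PySem.Set.empty, PySem.Set.update_empty]

-- updating with a set is updating with the underlying list
theorem update_ofList (s : PySem.Set Int) (xs : List Int) :
    PySem.Set.update s (PySem.Set.ofList xs) = PySem.Set.update s xs := by
  rw [PySem.Set.update_eq_append_filter, PySem.Set.update_eq_append_filter, PySem.Set.ofList_ofList]

-- updating with already-present values is the identity
theorem update_of_subset (s : PySem.Set Int) (xs : List Int) (h : ∀ x ∈ xs, x ∈ s) :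
    PySem.Set.update s xs = s := by
  induction xs generalizing s with
  | nil => simp [PySem.Set.update]
  | cons x xs ih =>
    rw [PySem.Set.update_cons, PySem.Set.add_of_mem (h x (by simp))]
    exact ih s (fun y hy => h y (by simp [hy]))

-- B's inner fold appends the same new-element suffix to both components
theorem pairFold_spec (vs : List Int) : ∀ (s n : List Int),
    ∃ w, vs.foldl (fun st v => if v ∈ st.1 then st else (st.1 ++ [v], st.2 ++ [v])) (s, n)
          = (s ++ w, n ++ w) ∧ PySem.Set.update s vs = s ++ w := by
  induction vs with
  | nil => intro s n; exact ⟨[], by simp, by simp [PySem.Set.update]⟩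
  | cons v vs ih =>
    intro s n
    rw [List.foldl_cons, PySem.Set.update_cons]
    by_cases hv : v ∈ s
    · simpa [hv, PySem.Set.add_of_mem hv] using ih s n
    · obtain ⟨w, hf, hu⟩ := ih (s ++ [v]) (n ++ [v])
      exact ⟨v :: w, by simpa [hv] using hf, by
        rw [PySem.Set.add_of_not_mem hv, hu]; simp⟩

-- B's queue fold is the inner fold over the concatenated successor lists
theorem queueFold_eq (backFacts : List (Int × List Int)) (q : List Int) : ∀ (s n : List Int),
    q.foldl (pvStep backFacts) (s, n)
      = (q.flatMap (pvSucc backFacts)).foldl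
          (fun st v => if v ∈ st.1 then st else (st.1 ++ [v], st.2 ++ [v])) (s, n) := by
  induction q with
  | nil => intro s n; simp
  | cons f q ih =>
    intro s n
    rw [List.foldl_cons, List.flatMap_cons, List.foldl_append]
    have h : pvStep backFacts (s, n) f
        = (pvSucc backFacts f).foldl
            (fun st v => if v ∈ st.1 then st else (st.1 ++ [v], st.2 ++ [v])) (s, n) := rfl
    rw [h]
    obtain ⟨s', n'⟩ := (pvSucc backFacts f).foldl
            (fun st v => if v ∈ st.1 then st else (st.1 ++ [v], st.2 ++ [v])) (s, n)
    exact ih s' n'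

-- main joint induction: with the already-processed prefix p of the fact list saturated
-- (every successor of a fact of p is present), A's whole-set round and B's queue round
-- append the same suffix, so the two loops return the same list
theorem loops_eq (backFacts : List (Int × List Int)) :
    ∀ (fuel : Nat) (s q p : List Int), s = p ++ q →
      (∀ f ∈ p, ∀ v ∈ pvSucc backFacts f, v ∈ s) →
      pvALoop backFacts fuel s = pvBLoop backFacts fuel s q := by
  intro fuel
  induction fuel with
  | zero => intro s q p _ _; cases q <;> rfl
  | succ fuel ih =>
    intro s q p hpq hsat
    obtain ⟨w, hfold, hupd⟩ := pairFold_spec (q.flatMap (pvSucc backFacts)) s []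
    have hsub : ∀ x ∈ p.flatMap (pvSucc backFacts), x ∈ s := by
      intro x hx
      rw [List.mem_flatMap] at hx
      obtain ⟨f, hf, hv⟩ := hx
      exact hsat f hf x hv
    have hA : PySem.Set.update s (pvRound backFacts s) = s ++ w := by
      rw [pvRound_eq, update_ofList, hpq, List.flatMap_append, PySem.Set.update_append,
          ← hpq, update_of_subset s _ hsub, hupd]
    have hAll : PySem.Set.update s (s.flatMap (pvSucc backFacts)) = s ++ w := by
      conv_lhs => rw [hpq, List.flatMap_append, PySem.Set.update_append, ← hpq,
        update_of_subset s _ hsub]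
      exact hupd
    cases q with
    | nil =>
      have hw : w = [] := by
        have h := hupd
        simp [PySem.Set.update] at h
        simpa using h.symm
      subst hw
      show (if (PySem.Set.update s (pvRound backFacts s)).length ≠ s.length
            then pvALoop backFacts fuel (PySem.Set.update s (pvRound backFacts s))
            else PySem.Set.update s (pvRound backFacts s)) = s
      rw [hA]; simp
    | cons f qs =>
      have hB : pvBLoop backFacts (fuel + 1) s (f :: qs) = pvBLoop backFacts fuel (s ++ w) w := by
        show pvBLoop backFacts fuel ((f :: qs).foldl (pvStep backFacts) (s, [])).1
              ((f :: qs).foldl (pvStep backFacts) (s, [])).2 = _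
        rw [queueFold_eq, hfold]; rfl
      rw [hB]
      show (if (PySem.Set.update s (pvRound backFacts s)).length ≠ s.length
            then pvALoop backFacts fuel (PySem.Set.update s (pvRound backFacts s))
            else PySem.Set.update s (pvRound backFacts s)) = _
      rw [hA]
      cases w with
      | nil => simp; cases fuel <;> rfl
      | cons v ws =>
        have hlen : (s ++ v :: ws).length ≠ s.length := by simp
        rw [if_pos hlen]
        refine ih (s ++ v :: ws) (v :: ws) s rfl ?_
        intro g hg u hu
        have h : u ∈ PySem.Set.update s (s.flatMap (pvSucc backFacts)) :=
          (PySem.Set.mem_update _ _ _).2 (Or.inr (List.mem_flatMap.2 ⟨g, hg, hu⟩))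
        rwa [hAll] at h

-- ===== VERDICT (by name: the statement is the Claim_ definition above) =====
theorem factsLinksProcessing_spec : Claim_equal_factsLinksProcessing := by
  intro factSet backFacts _
  unfold Spec_factsLinksProcessing factsLinksProcessing factsLinksProcessing_alt
  exact loops_eq backFacts (pvFuel backFacts) factSet factSet [] rfl (by simp)
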